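-- pv_equiv track=rewrite | github.com/KuziaMak/-algorithms_2021 | Урок 1. Практическое задание/task_5.py | proba
-- ===== SOURCE A (Python) =====
-- class StackClass:
--     def __init__(self):
--         self.elems = []
--         self.stopk = []
--
--     def pusto(self):
--         return self.stopk == []
--
--     def clear_elems(self):
--         self.elems.clear()
--
--     def push_in(self, el):
--         self.elems.append(el)
--         if len(self.elems) == 5:
--             self.stopki()
--
--     def stopki(self):
--         self.stopk.append(self.elems.copy())
--         self.clear_elems()
--
--     def popen(self):
--         return self.stopk.pop()
--
-- def proba(n):
--     stk = StackClass()
--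
--     for i in range(n):
--         stk.push_in(1)
--     if stk.elems:
--         stk.stopki()
--     result = ""
--     while not stk.pusto():
--         result += str(len(stk.popen())) + " "
--
--     return f"Всего стопок: " + result
-- ===== SOURCE B (Python) =====
-- def proba(n):
--     if n <= 0:
--         return "Всего стопок: "
--     q, r = divmod(n, 5)
--     head = f"{r} " if r else ""
--     return "Всего стопок: " + head + "5 " * q
-- ===== Notes on version B (the rewrite author's own statement) =====
-- stated objective: faster
-- what changed: Replaces the O(n) push-one-at-a-time stack simulation and pop loop by a closed form: quotient and remainder of n by five give an optional remainder token followed by the full-stack token repeated quotient times.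
import Mathlib
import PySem

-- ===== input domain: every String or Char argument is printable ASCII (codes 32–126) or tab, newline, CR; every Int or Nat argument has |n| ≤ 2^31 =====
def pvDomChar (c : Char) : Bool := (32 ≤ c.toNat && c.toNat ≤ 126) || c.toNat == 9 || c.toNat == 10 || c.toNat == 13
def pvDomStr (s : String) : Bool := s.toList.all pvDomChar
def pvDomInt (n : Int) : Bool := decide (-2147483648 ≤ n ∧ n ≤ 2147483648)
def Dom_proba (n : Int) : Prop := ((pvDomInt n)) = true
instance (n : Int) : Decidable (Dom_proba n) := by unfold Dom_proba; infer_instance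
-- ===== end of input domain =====

-- B replaces A's O(n) one-by-one stack simulation by the closed form divmod(n,5): faster (asymptotic).


-- ===== PORT A =====
-- push_in: append el to elems; if 5 elements, move the full stack onto stopk
def pushIn (st : List Int × List (List Int)) (el : Int) : List Int × List (List Int) :=
  let elems := st.1 ++ [el]
  if elems.length = 5 then ([], st.2 ++ [elems]) else (elems, st.2)

-- the while-loop: pop from the END of stopk, append the popped stack's size to result
def popLoop (stopk : List (List Int)) (result : String) : String :=
  match _h : stopk.getLast? with
  | none => result
  | some last => popLoop stopk.dropLast (result ++ PySem.Int.toStr (last.length : Int) ++ " ")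
termination_by stopk.length
decreasing_by
  have hne : stopk ≠ [] := by rintro rfl; simp at _h
  have := List.length_pos_iff.mpr hne
  simp [List.length_dropLast]; omega

def proba (n : Int) : String :=
  let st := (PySem.List.pyRange 0 n 1).foldl (fun st _i => pushIn st 1) ([], [])
  let st2 := if st.1 ≠ [] then (([] : List Int), st.2 ++ [st.1]) else st
  "Всего стопок: " ++ popLoop st2.2 ""

-- ===== PORT B =====
-- '"5 " * q'
def strRep (s : String) : Nat → String
  | 0 => ""
  | k + 1 => s ++ strRep s k

def proba_alt (n : Int) : String :=
  if n ≤ 0 then "Всего стопок: "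
  else
    let q := PySem.Int.floordiv n 5
    let r := PySem.Int.mod n 5
    let head := if r ≠ 0 then PySem.Int.toStr r ++ " " else ""
    "Всего стопок: " ++ head ++ strRep "5 " q.toNat

-- ===== PRECONDITION & SPEC =====
def Spec_proba (n : Int) (out : String) : Prop := out = proba_alt n
instance (n : Int) (out : String) : Decidable (Spec_proba n out) := by unfold Spec_proba; infer_instance

-- ===== CLAIM (what is proved, stated in full; the proofs are below) =====
def Claim_equal_proba : Prop := ∀ (n : Int), Dom_proba n → Spec_proba n (proba n)

-- ===== LEMMAS AND PROOFS =====

-- fold invariant: after t+len pushes the state is (remainder-so-far, list of full stacks)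
lemma fold_state (l : List Int) : ∀ t : Nat,
    l.foldl (fun st _i => pushIn st 1)
      (List.replicate (t % 5) (1 : Int), List.replicate (t / 5) (List.replicate 5 (1 : Int)))
    = (List.replicate ((t + l.length) % 5) (1 : Int),
       List.replicate ((t + l.length) / 5) (List.replicate 5 (1 : Int))) := by
  induction l with
  | nil => intro t; simp
  | cons x xs ih =>
    intro t
    have hstep : pushIn (List.replicate (t % 5) (1 : Int),
        List.replicate (t / 5) (List.replicate 5 (1 : Int))) 1
        = (List.replicate ((t + 1) % 5) (1 : Int),
           List.replicate ((t + 1) / 5) (List.replicate 5 (1 : Int))) := by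
      unfold pushIn
      by_cases h4 : t % 5 = 4
      · have h1 : (t + 1) % 5 = 0 := by omega
        have h2 : (t + 1) / 5 = t / 5 + 1 := by omega
        simp only [h4, h1, h2]
        have : List.replicate 4 (1 : Int) ++ [1] = List.replicate 5 (1 : Int) := by decide
        simp [List.replicate_succ' (n := t / 5)]
      · have h1 : (t + 1) % 5 = t % 5 + 1 := by omega
        have h2 : (t + 1) / 5 = t / 5 := by omega
        have hlt : t % 5 < 4 := by omega
        simp only [h1, h2]
        simp [← List.replicate_succ' (n := t % 5)]
        omega
    simp only [List.foldl_cons, hstep, ih (t + 1)]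
    have : t + 1 + xs.length = t + (x :: xs).length := by simp; omega
    rw [this]

lemma popLoop_concat (xs : List (List Int)) (y : List Int) (res : String) :
    popLoop (xs ++ [y]) res = popLoop xs (res ++ PySem.Int.toStr (y.length : Int) ++ " ") := by
  rw [popLoop]
  split
  · next heq => rw [List.getLast?_concat] at heq; cases heq
  · next last heq =>
      rw [List.getLast?_concat] at heq
      injection heq with h2
      rw [h2, List.dropLast_concat]

lemma popLoop_nil (res : String) : popLoop [] res = res := by
  rw [popLoop]
  split
  · rfl
  · next last heq => simp at heq

lemma popLoop_replicate (q : Nat) (res : String) :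
    popLoop (List.replicate q (List.replicate 5 (1 : Int))) res = res ++ strRep "5 " q := by
  induction q generalizing res with
  | zero => simp [popLoop_nil, strRep]
  | succ k ih =>
    rw [List.replicate_succ', popLoop_concat, ih]
    have h5 : PySem.Int.toStr ((List.replicate 5 (1 : Int)).length : Int) = "5" := by decide
    rw [h5, strRep]
    simp [String.append_assoc]

-- ===== VERDICT (by name: the statement is the Claim_ definition above) =====
theorem proba_spec : Claim_equal_proba := by
  intro n _
  unfold Spec_proba proba proba_alt
  by_cases hn : n ≤ 0
  · rw [PySem.List.pyRange_one_eq_nil (by omega)]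
    simp [hn, popLoop_nil]
  · have hpos : 0 < n := by omega
    set m : Nat := n.toNat with hm
    have hlen : (PySem.List.pyRange 0 n 1).length = m := by
      rw [PySem.List.length_pyRange_one]; omega
    have hfold := fold_state (PySem.List.pyRange 0 n 1) 0
    simp only [Nat.zero_mod, Nat.zero_div, List.replicate_zero, Nat.zero_add, hlen] at hfold
    have hq : (PySem.Int.floordiv n 5).toNat = m / 5 := by
      rw [PySem.Int.floordiv_eq_ediv_of_pos (by omega)]; omega
    have hr : PySem.Int.mod n 5 = ((m % 5 : Nat) : Int) := by
      rw [PySem.Int.mod_eq_emod_of_pos (by omega)]; omega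
    simp only [hfold, if_neg hn, hq, hr]
    by_cases hr0 : m % 5 = 0
    · have h1 : List.replicate (m % 5) (1 : Int) = [] := by rw [hr0]; rfl
      have h2 : ((m % 5 : Nat) : Int) = 0 := by omega
      simp only [h1, h2, ne_eq, not_true_eq_false, if_false]
      rw [popLoop_replicate]
      simp
    · have hne : List.replicate (m % 5) (1 : Int) ≠ [] := by
        simp [List.replicate_eq_nil_iff]; omega
      rw [if_pos hne, popLoop_concat, popLoop_replicate]
      have hlen2 : ((List.replicate (m % 5) (1 : Int)).length : Int) = ((m % 5 : Nat) : Int) := by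
        simp
      rw [hlen2, if_pos (show ((m % 5 : Nat) : Int) ≠ 0 by omega)]
      simp [String.append_assoc]
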